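-- pv_equiv track=rewrite | github.com/1r0nw1ll/quantum-arithmetic-research | qa_brainca_selforg_v2.py | classify_orbit
-- ===== SOURCE A (Python) =====
-- M = 9
--
-- def qa_step(b, e, m=M):
--     """A1-compliant QA step."""
--     b_new = ((b + e - 1) % m) + 1
--     e_new = ((e + b_new - 1) % m) + 1
--     return b_new, e_new
--
-- def classify_orbit(b, e, m=M):
--     """Classify orbit type by cycle length."""
--     seen = []
--     state = (b, e)
--     for _ in range(m * m + 1):
--         if state in seen:
--             clen = len(seen) - seen.index(state)
--             if clen == 1:
--                 return 0  # singularity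
--             elif clen <= 8:
--                 return 1  # satellite
--             else:
--                 return 2  # cosmos
--         seen.append(state)
--         state = qa_step(state[0], state[1], m)
--     return -1
-- ===== SOURCE B (Python) =====
-- M = 9
--
-- def qa_step(b, e, m=M):
--     """A1-compliant QA step."""
--     b_new = ((b + e - 1) % m) + 1
--     e_new = ((e + b_new - 1) % m) + 1
--     return b_new, e_new
--
-- def classify_orbit(b, e, m=M):
--     """Classify orbit type by cycle length.
--
--     qa_step is a bijection on canonical residue pairs, so the orbit of
--     s1 = qa_step(b, e) is purely periodic: instead of keeping a history of
--     visited states, walk the cycle of s1 exactly once, counting its length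
--     lam and noting whether the start state itself lies on the cycle (then
--     the first repeat happens one step earlier)."""
--     s0 = (b, e)
--     s1 = qa_step(b, e, m)
--     lam = 1
--     on_cycle = (s0 == s1)
--     s = qa_step(s1[0], s1[1], m)
--     while s != s1:
--         on_cycle = on_cycle or (s == s0)
--         s = qa_step(s[0], s[1], m)
--         lam += 1
--     first_repeat = lam if on_cycle else lam + 1
--     if first_repeat > m * m:
--         return -1
--     if lam == 1:
--         return 0
--     elif lam <= 8:
--         return 1
--     else:
--         return 2
-- ===== Notes on version B (the rewrite author's own statement) =====
-- stated objective: faster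
-- what changed: B keeps no history at all: since qa_step is a bijection on canonical residue pairs, the orbit of s1=qa_step(b,e) is purely periodic, so B walks that cycle exactly once to get its length lam and checks on the way whether the start state lies on the cycle, replacing A's growing 'seen' list with its per-step linear membership scan and .index pass.
import Mathlib
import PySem

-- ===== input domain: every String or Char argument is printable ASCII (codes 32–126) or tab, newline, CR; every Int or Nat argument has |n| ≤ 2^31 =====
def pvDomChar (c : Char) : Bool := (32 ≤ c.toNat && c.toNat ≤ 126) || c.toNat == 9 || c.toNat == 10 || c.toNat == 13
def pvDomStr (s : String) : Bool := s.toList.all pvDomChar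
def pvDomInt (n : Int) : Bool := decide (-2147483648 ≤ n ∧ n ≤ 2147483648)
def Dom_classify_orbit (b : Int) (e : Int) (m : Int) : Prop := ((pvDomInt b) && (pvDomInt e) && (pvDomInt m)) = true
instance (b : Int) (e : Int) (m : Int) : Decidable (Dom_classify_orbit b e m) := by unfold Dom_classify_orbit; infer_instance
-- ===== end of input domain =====

-- B drops A's history list entirely: qa_step is a bijection on canonical residue pairs, so the
-- orbit of s1 = qa_step(b,e) is purely periodic and B just walks that cycle once (O(cycle) vs
-- A's quadratic membership scans); equivalence proved for m ≠ 0.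

-- ===== PORT A =====
def qa_step (b : Int) (e : Int) (m : Int) : Int × Int :=
  let b_new := PySem.Int.mod (b + e - 1) m + 1
  let e_new := PySem.Int.mod (e + b_new - 1) m + 1
  (b_new, e_new)

-- the 'for _ in range(m*m+1)' loop with early return, as fuel recursion over the state (seen, state)
def classifyLoopA (m : Int) : Nat → List (Int × Int) → (Int × Int) → Int
  | 0, _, _ => -1
  | n + 1, seen, state =>
    if state ∈ seen then
      let clen : Int := (seen.length : Int) - (((PySem.List.index? seen state).getD 0 : Nat) : Int)
      if clen = 1 then 0
      else if clen ≤ 8 then 1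
      else 2
    else
      classifyLoopA m n (seen ++ [state]) (qa_step state.1 state.2 m)

def classify_orbit (b : Int) (e : Int) (m : Int) : Int :=
  classifyLoopA m (m * m + 1).toNat [] (b, e)

-- ===== PORT B =====
-- Source B's 'while s != s1' loop: walk the cycle of s1 once, counting its length lam and flagging
-- whether s0 lies on it.  The fuel (m*m).toNat only makes the recursion total; on Pre_ the loop
-- provably exits before the fuel runs out (lemma loopB_run below).
def loopB (m : Int) (s0 : Int × Int) (s1 : Int × Int) : Nat → (Int × Int) → Int → Bool → Int × Bool
  | 0, _, lam, onc => (lam, onc)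
  | fuel + 1, s, lam, onc =>
    if s = s1 then (lam, onc)
    else loopB m s0 s1 fuel (qa_step s.1 s.2 m) (lam + 1) (onc || decide (s = s0))

def classify_orbit_alt (b : Int) (e : Int) (m : Int) : Int :=
  let s0 := (b, e)
  let s1 := qa_step b e m
  let r := loopB m s0 s1 (m * m).toNat (qa_step s1.1 s1.2 m) 1 (decide (s0 = s1))
  let first_repeat := if r.2 then r.1 else r.1 + 1
  if first_repeat > m * m then -1
  else if r.1 = 1 then 0
  else if r.1 ≤ 8 then 1
  else 2

-- ===== PRECONDITION & SPEC =====
-- m = 0 makes '% m' raise ZeroDivisionError in both programs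
def Pre_classify_orbit (b : Int) (e : Int) (m : Int) : Prop := m ≠ 0
instance (b : Int) (e : Int) (m : Int) : Decidable (Pre_classify_orbit b e m) := by unfold Pre_classify_orbit; infer_instance
def pvWitness_classify_orbit : Int × Int × Int := (1, 1, 9)

def Spec_classify_orbit (b : Int) (e : Int) (m : Int) (out : Int) : Prop := out = classify_orbit_alt b e m
instance (b : Int) (e : Int) (m : Int) (out : Int) : Decidable (Spec_classify_orbit b e m out) := by unfold Spec_classify_orbit; infer_instance

-- ===== CLAIM (what is proved, stated in full; the proofs are below) =====
def Claim_equal_classify_orbit : Prop := ∀ (b : Int) (e : Int) (m : Int), Dom_classify_orbit b e m → Pre_classify_orbit b e m → Spec_classify_orbit b e m (classify_orbit b e m)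

-- ===== LEMMAS AND PROOFS =====

-- one application of qa_step, as a self-map of states
def pvStep (m : Int) (s : Int × Int) : Int × Int := qa_step s.1 s.2 m

-- s is a canonical representative pair: 'mod m' fixes both components (shifted by 1)
def pvCanon (m : Int) (s : Int × Int) : Prop :=
  PySem.Int.mod (s.1 - 1) m = s.1 - 1 ∧ PySem.Int.mod (s.2 - 1) m = s.2 - 1

-- the trajectory s0, f s0, f² s0, … of length k (A's 'seen' list after k iterations)
def pvTraj (m : Int) (s0 : Int × Int) (k : Nat) : List (Int × Int) :=
  (List.range k).map (fun i => (pvStep m)^[i] s0)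

-- B's 'on_cycle' accumulator after k checks: some f^[j] s1 (j < k) equals s0
def pvOnPref (m : Int) (s1 s0 : Int × Int) (k : Nat) : Bool :=
  (List.range k).any (fun j => decide ((pvStep m)^[j] s1 = s0))

theorem pv_mod_sub_dvd (a m : Int) : m ∣ (a - PySem.Int.mod a m) := by
  have h := PySem.Int.floordiv_mul_add_mod a m
  exact ⟨PySem.Int.floordiv a m, by linarith⟩

theorem pv_abs_window {m x y : Int} (hm : m ≠ 0)
    (hx1 : 0 < m → 0 ≤ x ∧ x < m) (hx2 : m < 0 → m < x ∧ x ≤ 0)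
    (hy1 : 0 < m → 0 ≤ y ∧ y < m) (hy2 : m < 0 → m < y ∧ y ≤ 0)
    (hd : m ∣ (x - y)) : x = y := by
  have hz : x - y = 0 := by
    apply Int.eq_zero_of_abs_lt_dvd ((abs_dvd m _).mpr hd)
    rcases lt_or_gt_of_ne hm with hneg | hpos
    · have h1 := hx2 hneg; have h2 := hy2 hneg
      rw [abs_of_neg hneg, abs_lt]; omega
    · have h1 := hx1 hpos; have h2 := hy1 hpos
      rw [abs_of_pos hpos, abs_lt]; omega
  omega

theorem pv_mod_bounds {m : Int} (hm : m ≠ 0) (a : Int) :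
    (0 < m → 0 ≤ PySem.Int.mod a m ∧ PySem.Int.mod a m < m) ∧
    (m < 0 → m < PySem.Int.mod a m ∧ PySem.Int.mod a m ≤ 0) :=
  ⟨fun h => ⟨PySem.Int.mod_nonneg a h, PySem.Int.mod_lt a h⟩,
   fun h => PySem.Int.mod_neg_bounds a h⟩

theorem pv_mod_fixed {m x : Int} (hm : m ≠ 0)
    (h1 : 0 < m → 0 ≤ x ∧ x < m) (h2 : m < 0 → m < x ∧ x ≤ 0) :
    PySem.Int.mod x m = x := by
  have hb := pv_mod_bounds hm x
  exact pv_abs_window hm hb.1 hb.2 h1 h2 (by simpa using (pv_mod_sub_dvd x m).neg_right)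

theorem pv_mod_idem {m : Int} (hm : m ≠ 0) (a : Int) :
    PySem.Int.mod (PySem.Int.mod a m) m = PySem.Int.mod a m := by
  have hb := pv_mod_bounds hm a
  exact pv_mod_fixed hm hb.1 hb.2

theorem pv_mod_congr_dvd {m x y : Int} (h : PySem.Int.mod x m = PySem.Int.mod y m) :
    m ∣ (x - y) := by
  have h1 := pv_mod_sub_dvd x m
  have h2 := pv_mod_sub_dvd y m
  have : x - y = (x - PySem.Int.mod x m) - (y - PySem.Int.mod y m) := by rw [h]; ring
  rw [this]; exact dvd_sub h1 h2

theorem pv_window_eq {m x y : Int} (hm : m ≠ 0)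
    (hx : PySem.Int.mod x m = x) (hy : PySem.Int.mod y m = y)
    (hd : m ∣ (x - y)) : x = y := by
  have hbx := pv_mod_bounds hm x
  have hby := pv_mod_bounds hm y
  rw [hx] at hbx; rw [hy] at hby
  exact pv_abs_window hm hbx.1 hbx.2 hby.1 hby.2 hd

theorem pv_step_canon {m : Int} (hm : m ≠ 0) (s : Int × Int) : pvCanon m (pvStep m s) := by
  unfold pvCanon pvStep qa_step
  simp only [add_sub_cancel_right]
  exact ⟨pv_mod_idem hm _, pv_mod_idem hm _⟩

theorem pv_step_inj {m : Int} (hm : m ≠ 0) {s t : Int × Int}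
    (hs : pvCanon m s) (ht : pvCanon m t) (h : pvStep m s = pvStep m t) : s = t := by
  unfold pvStep qa_step at h
  simp only [Prod.mk.injEq] at h
  obtain ⟨hb, he⟩ := h
  have hb' : PySem.Int.mod (s.1 + s.2 - 1) m = PySem.Int.mod (t.1 + t.2 - 1) m := by omega
  have he' : PySem.Int.mod (s.2 + (PySem.Int.mod (s.1 + s.2 - 1) m + 1) - 1) m
      = PySem.Int.mod (t.2 + (PySem.Int.mod (t.1 + t.2 - 1) m + 1) - 1) m := by omega
  rw [hb'] at he'
  have h2 : s.2 = t.2 := by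
    have hd : m ∣ (s.2 - t.2) := by
      have := pv_mod_congr_dvd (m := m) he'
      have h3 : (s.2 + (PySem.Int.mod (t.1 + t.2 - 1) m + 1) - 1) - (t.2 + (PySem.Int.mod (t.1 + t.2 - 1) m + 1) - 1) = s.2 - t.2 := by ring
      rwa [h3] at this
    have := pv_window_eq hm hs.2 ht.2 (by
      have : s.2 - 1 - (t.2 - 1) = s.2 - t.2 := by ring
      rw [this]; exact hd)
    omega
  have h1 : s.1 = t.1 := by
    have hd : m ∣ (s.1 - t.1) := by
      have := pv_mod_congr_dvd (m := m) hb'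
      have h3 : (s.1 + s.2 - 1) - (t.1 + t.2 - 1) = s.1 - t.1 := by rw [h2]; ring
      rwa [h3] at this
    have := pv_window_eq hm hs.1 ht.1 (by
      have : s.1 - 1 - (t.1 - 1) = s.1 - t.1 := by ring
      rw [this]; exact hd)
    omega
  exact Prod.ext h1 h2

theorem pv_canon_iter {m : Int} (hm : m ≠ 0) {s : Int × Int} (hs : pvCanon m s) (k : Nat) :
    pvCanon m ((pvStep m)^[k] s) := by
  induction k with
  | zero => simpa using hs
  | succ n ih => rw [Function.iterate_succ_apply']; exact pv_step_canon hm _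

theorem pv_iter_cancel {m : Int} (hm : m ≠ 0) {x y : Int × Int}
    (hx : pvCanon m x) (hy : pvCanon m y) (k : Nat)
    (h : (pvStep m)^[k] x = (pvStep m)^[k] y) : x = y := by
  induction k with
  | zero => simpa using h
  | succ n ih =>
    apply ih
    rw [Function.iterate_succ_apply', Function.iterate_succ_apply'] at h
    exact pv_step_inj hm (pv_canon_iter hm hx n) (pv_canon_iter hm hy n) h

theorem pv_exists_period {m : Int} (hm : m ≠ 0) {s1 : Int × Int} (hc : pvCanon m s1) :
    ∃ p : Nat, 0 < p ∧ p ≤ (m * m).toNat ∧ (pvStep m)^[p] s1 = s1 := by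
  set N : Nat := m.natAbs with hN
  have hNpos : 0 < N := Int.natAbs_pos.mpr hm
  set lo : Int := if 0 < m then 1 else m + 2 with hlo
  set hi : Int := if 0 < m then m else 1 with hhi
  set t : Finset (Int × Int) := Finset.Icc lo hi ×ˢ Finset.Icc lo hi with ht
  have hcard : t.card = N * N := by
    rw [ht, Finset.card_product, Int.card_Icc]
    rcases lt_or_gt_of_ne hm with hneg | hpos
    · simp only [hlo, hhi, if_neg (not_lt.mpr (le_of_lt hneg))]
      have : (1 + 1 - (m + 2)).toNat = N := by rw [hN]; omega
      rw [this]
    · simp only [hlo, hhi, if_pos hpos]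
      have : (m + 1 - 1).toNat = N := by rw [hN]; omega
      rw [this]
  have hmem : ∀ s : Int × Int, pvCanon m s → s ∈ t := by
    intro s hs
    have hb := pv_mod_bounds hm (s.1 - 1)
    have hb2 := pv_mod_bounds hm (s.2 - 1)
    rw [hs.1] at hb; rw [hs.2] at hb2
    rw [ht, Finset.mem_product, Finset.mem_Icc, Finset.mem_Icc]
    rcases lt_or_gt_of_ne hm with hneg | hpos
    · have := hb.2 hneg; have := hb2.2 hneg
      simp only [hlo, hhi, if_neg (not_lt.mpr (le_of_lt hneg))]
      omega
    · have := hb.1 hpos; have := hb2.1 hpos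
      simp only [hlo, hhi, if_pos hpos]
      omega
  have hlt : t.card < (Finset.range (N * N + 1)).card := by
    rw [hcard, Finset.card_range]; omega
  obtain ⟨i, hi', j, hj', hne, heq⟩ :=
    Finset.exists_ne_map_eq_of_card_lt_of_maps_to hlt
      (fun k _ => hmem ((pvStep m)^[k] s1) (pv_canon_iter hm hc k))
  simp only [Finset.mem_range] at hi' hj'
  -- wlog i < j
  rcases Nat.lt_or_ge i j with hij | hij
  case _ =>
    refine ⟨j - i, by omega, ?_, ?_⟩
    · have : (m * m).toNat = N * N := by
        have h1 : m * m = (N : Int) * (N : Int) := by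
          rw [hN]; exact_mod_cast (Int.natAbs_mul_self (a := m)).symm
        omega
      omega
    · have h1 : (pvStep m)^[i] ((pvStep m)^[j - i] s1) = (pvStep m)^[i] s1 := by
        rw [← Function.iterate_add_apply]
        have : i + (j - i) = j := by omega
        rw [this]; exact heq.symm
      exact pv_iter_cancel hm (pv_canon_iter hm hc _) hc i h1
  case _ =>
    have hij' : j < i := by omega
    refine ⟨i - j, by omega, ?_, ?_⟩
    · have h1 : m * m = (N : Int) * (N : Int) := by
        rw [hN]; exact_mod_cast (Int.natAbs_mul_self (a := m)).symm
      omega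
    · have h1 : (pvStep m)^[j] ((pvStep m)^[i - j] s1) = (pvStep m)^[j] s1 := by
        rw [← Function.iterate_add_apply]
        have : j + (i - j) = i := by omega
        rw [this]; exact heq
      exact pv_iter_cancel hm (pv_canon_iter hm hc _) hc j h1

theorem pv_index_first {α : Type} [BEq α] [LawfulBEq α] [DecidableEq α] (l : List α) (v : α) (I : Nat)
    (hI : I < l.length) (hv : l[I] = v) (hmin : ∀ j (hj : j < I), l[j]'(by omega) ≠ v) :
    PySem.List.index? l v = some I := by
  rw [PySem.List.index?_eq_some_iff]
  refine ⟨l.take I, l.drop (I + 1), ?_, by simp [List.length_take]; omega, ?_⟩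
  · conv_lhs => rw [← List.take_append_drop I l]
    congr 1
    rw [← hv]
    exact (List.getElem_cons_drop hI).symm
  · intro hmem
    obtain ⟨j, hj, hjv⟩ := List.mem_iff_getElem.mp hmem
    have hjI : j < I := by
      have := hj; simp [List.length_take] at this; omega
    exact hmin j hjI (by rw [← hjv]; simp [List.getElem_take])

theorem pv_traj_succ (m : Int) (s0 : Int × Int) (k : Nat) :
    pvTraj m s0 (k + 1) = pvTraj m s0 k ++ [(pvStep m)^[k] s0] := by
  unfold pvTraj; rw [List.range_succ, List.map_append]; rfl

theorem pv_traj_mem {m : Int} {s0 : Int × Int} {k : Nat} {x : Int × Int} :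
    x ∈ pvTraj m s0 k ↔ ∃ i < k, (pvStep m)^[i] s0 = x := by
  unfold pvTraj
  simp only [List.mem_map, List.mem_range, eq_comm]

theorem loopA_hit (m : Int) (s0 : Int × Int) (J I : Nat) (hIJ : I < J)
    (hrep : (pvStep m)^[J] s0 = (pvStep m)^[I] s0)
    (hdist : ∀ i j, i < j → j < J → (pvStep m)^[i] s0 ≠ (pvStep m)^[j] s0) :
    ∀ fuel k, k ≤ J → J - k < fuel →
      classifyLoopA m fuel (pvTraj m s0 k) ((pvStep m)^[k] s0) =
        (if (J : Int) - (I : Int) = 1 then 0 else if (J : Int) - (I : Int) ≤ 8 then 1 else 2) := by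
  intro fuel
  induction fuel with
  | zero => intro k _ h; omega
  | succ n ih =>
    intro k hkJ hfuel
    rcases Nat.lt_or_ge k J with hk | hk
    · -- not yet at the repeat: state not in seen
      have hnot : (pvStep m)^[k] s0 ∉ pvTraj m s0 k := by
        rw [pv_traj_mem]
        rintro ⟨i, hik, hi⟩
        exact hdist i k hik hk hi
      rw [classifyLoopA, if_neg hnot]
      have hstep : qa_step ((pvStep m)^[k] s0).1 ((pvStep m)^[k] s0).2 m
          = (pvStep m)^[k + 1] s0 := by
        rw [Function.iterate_succ_apply']; rfl
      rw [← pv_traj_succ, hstep]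
      exact ih (k + 1) (by omega) (by omega)
    · -- k = J: the repeat is found, at first index I
      have hkJ' : k = J := by omega
      rw [hkJ']
      have hmem : (pvStep m)^[J] s0 ∈ pvTraj m s0 J := by
        rw [pv_traj_mem]; exact ⟨I, hIJ, hrep.symm⟩
      rw [classifyLoopA, if_pos hmem]
      have hlen : (pvTraj m s0 J).length = J := by
        unfold pvTraj; simp
      have hI' : I < (pvTraj m s0 J).length := by rw [hlen]; omega
      have hv' : (pvTraj m s0 J)[I]'hI' = (pvStep m)^[J] s0 := by
        simp only [pvTraj, List.getElem_map, List.getElem_range]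
        exact hrep.symm
      have hmin' : ∀ j (hj : j < I), (pvTraj m s0 J)[j]'(by rw [hlen]; omega) ≠ (pvStep m)^[J] s0 := by
        intro j hj
        simp only [pvTraj, List.getElem_map, List.getElem_range]
        intro hc
        exact hdist j I hj hIJ (hc.trans hrep)
      rw [pv_index_first _ _ I hI' hv' hmin', hlen]
      simp

theorem loopA_miss (m : Int) (s0 : Int × Int) (N : Nat)
    (hdist : ∀ i j, i < j → j < N → (pvStep m)^[i] s0 ≠ (pvStep m)^[j] s0) :
    ∀ fuel k, k + fuel ≤ N → classifyLoopA m fuel (pvTraj m s0 k) ((pvStep m)^[k] s0) = -1 := by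
  intro fuel
  induction fuel with
  | zero => intro k _; rfl
  | succ n ih =>
    intro k hk
    have hnot : (pvStep m)^[k] s0 ∉ pvTraj m s0 k := by
      rw [pv_traj_mem]
      rintro ⟨i, hik, hi⟩
      exact hdist i k hik (by omega) hi
    rw [classifyLoopA, if_neg hnot]
    have hstep : qa_step ((pvStep m)^[k] s0).1 ((pvStep m)^[k] s0).2 m
        = (pvStep m)^[k + 1] s0 := by
      rw [Function.iterate_succ_apply']; rfl
    rw [← pv_traj_succ, hstep]
    exact ih (k + 1) (by omega)

theorem pv_onpref_succ (m : Int) (s1 s0 : Int × Int) (k : Nat) :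
    pvOnPref m s1 s0 (k + 1) = (pvOnPref m s1 s0 k || decide ((pvStep m)^[k] s1 = s0)) := by
  unfold pvOnPref
  rw [List.range_succ, List.any_append]
  simp

theorem loopB_run (m : Int) (s0 s1 : Int × Int) (P : Nat)
    (hP : (pvStep m)^[P] s1 = s1) (hPpos : 0 < P)
    (hmin : ∀ q, 0 < q → q < P → (pvStep m)^[q] s1 ≠ s1) :
    ∀ fuel k, 0 < k → k ≤ P → P - k < fuel →
      loopB m s0 s1 fuel ((pvStep m)^[k] s1) (k : Int) (pvOnPref m s1 s0 k) =
        ((P : Int), pvOnPref m s1 s0 P) := by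
  intro fuel
  induction fuel with
  | zero => intro k _ _ h; omega
  | succ n ih =>
    intro k hk0 hkP hfuel
    by_cases hs : (pvStep m)^[k] s1 = s1
    · have hkP' : k = P := by
        by_contra hne
        exact hmin k hk0 (by omega) hs
      rw [loopB, if_pos hs, hkP']
    · have hklt : k < P := by
        rcases Nat.lt_or_ge k P with h | h
        · exact h
        · exfalso; exact hs (by rw [show k = P from by omega]; exact hP)
      rw [loopB, if_neg hs]
      have hstep : qa_step ((pvStep m)^[k] s1).1 ((pvStep m)^[k] s1).2 m
          = (pvStep m)^[k + 1] s1 := by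
        rw [Function.iterate_succ_apply']; rfl
      rw [hstep, ← pv_onpref_succ]
      have hcast : (k : Int) + 1 = ((k + 1 : Nat) : Int) := by push_cast; ring
      rw [hcast]
      exact ih (k + 1) (by omega) (by omega) (by omega)

-- ===== VERDICT (by name: the statement is the Claim_ definition above) =====
theorem classify_orbit_spec : Claim_equal_classify_orbit := by
  intro b e m _ hm
  unfold Spec_classify_orbit classify_orbit
  simp only [classify_orbit_alt]
  set s0 : Int × Int := (b, e) with hs0
  rw [show qa_step b e m = pvStep m s0 from rfl]
  set s1 : Int × Int := pvStep m s0 with hs1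
  have hc1 : pvCanon m s1 := pv_step_canon hm s0
  obtain ⟨p, hp0, hpb, hps⟩ := pv_exists_period hm hc1
  have hex : ∃ q, 0 < q ∧ (pvStep m)^[q] s1 = s1 := ⟨p, hp0, hps⟩
  set P := Nat.find hex with hPdef
  obtain ⟨hPpos, hPspec⟩ := Nat.find_spec hex
  have hPmin : ∀ q, 0 < q → q < P → (pvStep m)^[q] s1 ≠ s1 := by
    intro q hq0 hqP hqs
    exact Nat.find_min hex hqP ⟨hq0, hqs⟩
  have hPb : P ≤ (m * m).toNat := le_trans (Nat.find_min' hex ⟨hp0, hps⟩) hpb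
  have hmm_pos : (0:Int) < m * m := mul_self_pos.mpr hm
  have hmmt : ((m * m).toNat : Int) = m * m := Int.toNat_of_nonneg (le_of_lt hmm_pos)
  have hfuel1 : (m * m + 1).toNat = (m * m).toNat + 1 := by omega
  -- rewrite B's loop call into the canonical form and evaluate it
  have hBloop := loopB_run m s0 s1 P hPspec hPpos hPmin (m*m).toNat 1
    one_pos hPpos (by omega)
  rw [Nat.cast_one] at hBloop
  rw [show qa_step s1.1 s1.2 m = (pvStep m)^[1] s1 from by
        rw [Function.iterate_one]; rfl,
      show (decide (s0 = s1) : Bool) = pvOnPref m s1 s0 1 from by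
        unfold pvOnPref
        simp [List.range_one, eq_comm],
      hBloop]
  -- iterates of s0 shifted by one are iterates of s1
  have hshift : ∀ k : Nat, (pvStep m)^[k+1] s0 = (pvStep m)^[k] s1 := by
    intro k
    rw [Function.iterate_succ_apply, ← hs1]
  have hdiff : ∀ a c : Nat, a < c → c - a < P →
      (pvStep m)^[a] s1 ≠ (pvStep m)^[c] s1 := by
    intro a c hac hwin heq
    have h1 : (pvStep m)^[a] ((pvStep m)^[c - a] s1) = (pvStep m)^[a] s1 := by
      rw [← Function.iterate_add_apply, show a + (c - a) = c from by omega]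
      exact heq.symm
    exact hPmin (c - a) (by omega) hwin
      (pv_iter_cancel hm (pv_canon_iter hm hc1 (c - a)) hc1 a h1)
  by_cases hoc : pvOnPref m s1 s0 P = true
  · -- s0 lies on the cycle: the first repeat is s_P = s0, cycle length P
    obtain ⟨j, hjP, hjs⟩ : ∃ j, j < P ∧ (pvStep m)^[j] s1 = s0 := by
      unfold pvOnPref at hoc
      simpa [List.any_eq_true] using hoc
    have hs0cyc : (pvStep m)^[P] s0 = s0 := by
      rw [← hjs, ← Function.iterate_add_apply, Nat.add_comm,
          Function.iterate_add_apply, hPspec]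
    have hdist : ∀ i j', i < j' → j' < P →
        (pvStep m)^[i] s0 ≠ (pvStep m)^[j'] s0 := by
      intro i j' hij hj'P
      rcases Nat.eq_zero_or_pos i with hi0 | hipos
      · subst hi0
        intro hc
        simp only [Function.iterate_zero_apply] at hc
        have hc2 : (pvStep m)^[j'] s0 = (pvStep m)^[P] s0 := by rw [hs0cyc, ← hc]
        have hc' : (pvStep m)^[j'-1] s1 = (pvStep m)^[P-1] s1 := by
          rw [← hshift, ← hshift, show j' - 1 + 1 = j' from by omega,
              show P - 1 + 1 = P from by omega]
          exact hc2
        exact hdiff (j'-1) (P-1) (by omega) (by omega) hc'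
      · intro hc
        have hc' : (pvStep m)^[i-1] s1 = (pvStep m)^[j'-1] s1 := by
          rw [← hshift, ← hshift, show i - 1 + 1 = i from by omega,
              show j' - 1 + 1 = j' from by omega]
          exact hc
        exact hdiff (i-1) (j'-1) (by omega) (by omega) hc'
    have hA := loopA_hit m s0 P 0 hPpos (by simpa using hs0cyc) hdist
      ((m*m+1).toNat) 0 (by omega) (by omega)
    have hA' : classifyLoopA m (m*m+1).toNat [] s0 =
        (if (P : Int) = 1 then 0 else if (P : Int) ≤ 8 then 1 else 2) := by
      have := hA
      simp only [pvTraj, List.range_zero, List.map_nil,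
        Function.iterate_zero_apply, Nat.cast_zero, sub_zero] at this
      exact this
    rw [hA', hoc, if_pos rfl, if_neg (by omega : ¬((P : Int) > m * m))]
  · -- s0 is off the cycle: the first repeat is s_{P+1} = s_1, cycle length P
    have hoc' : ∀ j, j < P → (pvStep m)^[j] s1 ≠ s0 := by
      intro j hjP hjs
      apply hoc
      unfold pvOnPref
      simp only [List.any_eq_true, List.mem_range, decide_eq_true_eq]
      exact ⟨j, hjP, hjs⟩
    have hrep : (pvStep m)^[P+1] s0 = (pvStep m)^[1] s0 := by
      rw [hshift, hshift, hPspec]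
      simp
    have hdist : ∀ i j', i < j' → j' < P + 1 →
        (pvStep m)^[i] s0 ≠ (pvStep m)^[j'] s0 := by
      intro i j' hij hj'P
      rcases Nat.eq_zero_or_pos i with hi0 | hipos
      · subst hi0
        intro hc
        simp only [Function.iterate_zero_apply] at hc
        apply hoc' (j'-1) (by omega)
        rw [← hshift, show j' - 1 + 1 = j' from by omega]
        exact hc.symm
      · intro hc
        have hc' : (pvStep m)^[i-1] s1 = (pvStep m)^[j'-1] s1 := by
          rw [← hshift, ← hshift, show i - 1 + 1 = i from by omega,
              show j' - 1 + 1 = j' from by omega]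
          exact hc
        exact hdiff (i-1) (j'-1) (by omega) (by omega) hc'
    rw [Bool.not_eq_true] at hoc
    rw [hoc]
    simp only [Bool.false_eq_true, if_false]
    rcases Nat.lt_or_ge P ((m*m).toNat) with hPlt | hPge
    · -- the repeat is still inside the m*m+1 probed indices
      have hA := loopA_hit m s0 (P+1) 1 (by omega) hrep hdist
        ((m*m+1).toNat) 0 (by omega) (by omega)
      have hA' : classifyLoopA m (m*m+1).toNat [] s0 =
          (if (P : Int) = 1 then 0 else if (P : Int) ≤ 8 then 1 else 2) := by
        have := hA
        simp only [pvTraj, List.range_zero, List.map_nil,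
          Function.iterate_zero_apply] at this
        rw [this]
        have h1 : ((P:Int) + 1) - (1:Int) = (P:Int) := by ring
        push_cast
        rw [h1]
      rw [hA', if_neg (by omega : ¬((P : Int) + 1 > m * m))]
    · -- P = m*m: the repeat happens one step past the last probe, A returns -1
      have hPeq : P = (m*m).toNat := by omega
      have hdist' : ∀ i j, i < j → j < (m*m+1).toNat →
          (pvStep m)^[i] s0 ≠ (pvStep m)^[j] s0 := by
        intro i j hij hj
        exact hdist i j hij (by omega)
      have hA := loopA_miss m s0 ((m*m+1).toNat) hdist' ((m*m+1).toNat) 0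
        (by omega)
      have hA' : classifyLoopA m (m*m+1).toNat [] s0 = -1 := by
        have := hA
        simp only [pvTraj, List.range_zero, List.map_nil,
          Function.iterate_zero_apply] at this
        exact this
      rw [hA', if_pos (by omega : (P : Int) + 1 > m * m)]
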